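-- pv_equiv track=rewrite | github.com/randriu/umbi | umbi/io/csr.py | is_vector_csr
-- ===== SOURCE A (Python) =====
-- def is_vector_csr(vector: list[int]) -> bool:
--     """Check if a vector is a CSR row start index vector."""
--     if len(vector) < 2:
--         return False
--     if not all(isinstance(x, int) for x in vector):
--         return False
--     if vector[0] != 0:
--         return False
--     if not all(vector[i] <= vector[i + 1] for i in range(len(vector) - 1)):
--         return False
--     return True
-- ===== SOURCE B (Python) =====
-- def is_vector_csr(vector: list[int]) -> bool:
--     """Check if a vector is a CSR row start index vector."""
--     return (len(vector) >= 2
--             and all(isinstance(x, int) for x in vector)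
--             and vector[0] == 0
--             and sorted(vector) == vector)
-- ===== Notes on version B (the rewrite author's own statement) =====
-- stated objective: alternative
-- what changed: Replaces A's explicit index-pair scan for monotonicity by comparing the list with its sorted copy (sorted(vector) == vector), the whole check collapsing into one boolean conjunction; monotone iff the stable sort is the identity.
import Mathlib
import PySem

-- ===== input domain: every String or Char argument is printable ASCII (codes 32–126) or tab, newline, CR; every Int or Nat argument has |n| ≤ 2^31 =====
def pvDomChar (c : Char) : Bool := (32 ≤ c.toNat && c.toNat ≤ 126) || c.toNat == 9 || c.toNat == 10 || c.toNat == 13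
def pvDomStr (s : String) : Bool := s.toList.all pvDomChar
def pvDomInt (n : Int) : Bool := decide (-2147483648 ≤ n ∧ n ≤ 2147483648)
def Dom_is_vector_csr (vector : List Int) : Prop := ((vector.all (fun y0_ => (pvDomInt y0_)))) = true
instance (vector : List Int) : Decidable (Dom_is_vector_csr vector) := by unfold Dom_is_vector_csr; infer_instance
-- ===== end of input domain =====

-- B replaces A's index-pair monotonicity scan by comparing the list with its sorted copy
-- (sorted(vector) == vector) in one boolean conjunction; objective: alternative.


-- ===== PORT A =====
def is_vector_csr (vector : List Int) : Bool :=
  if vector.length < 2 then false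
  -- isinstance(x, int) is always true for a List Int input
  else if !(vector.all (fun _ => true)) then false
  else if PySem.List.pyGetD vector 0 0 ≠ 0 then false
  else if !((PySem.List.pyRange 0 ((vector.length : Int) - 1) 1).all
      (fun i => decide (PySem.List.pyGetD vector i 0 ≤ PySem.List.pyGetD vector (i + 1) 0)))
    then false
  else true

-- ===== PORT B =====
def is_vector_csr_alt (vector : List Int) : Bool :=
  decide (2 ≤ vector.length)
    -- isinstance(x, int) is always true for a List Int input
    && vector.all (fun _ => true)
    && (PySem.List.pyGetD vector 0 0 == 0)
    && (PySem.List.sorted vector (fun x => x) false == vector)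

-- ===== PRECONDITION & SPEC =====
def Spec_is_vector_csr (vector : List Int) (out : Bool) : Prop := out = is_vector_csr_alt vector
instance (vector : List Int) (out : Bool) : Decidable (Spec_is_vector_csr vector out) := by unfold Spec_is_vector_csr; infer_instance

-- ===== CLAIM (what is proved, stated in full; the proofs are below) =====
def Claim_equal_is_vector_csr : Prop := ∀ (vector : List Int), Dom_is_vector_csr vector → Spec_is_vector_csr vector (is_vector_csr vector)

-- ===== LEMMAS AND PROOFS =====

-- the stable sort is the identity exactly on pairwise-≤ lists
theorem sorted_eq_self_iff_pairwise (l : List Int) :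
    (PySem.List.sorted l (fun x => x) false = l) ↔ l.Pairwise (· ≤ ·) := by
  constructor
  · intro h
    have := PySem.List.sorted_pairwise l (fun x => x) (κ := Int)
    rwa [h] at this
  · intro h
    exact PySem.List.sorted_eq_self_of_pairwise l (fun x => x) h

-- A's indexed pair scan decides IsChain (≤)
theorem scanA_eq_chain (l : List Int) :
    ((PySem.List.pyRange 0 ((l.length : Int) - 1) 1).all
      (fun i => decide (PySem.List.pyGetD l i 0 ≤ PySem.List.pyGetD l (i + 1) 0)))
      = decide (List.IsChain (· ≤ ·) l) := by
  rw [Bool.eq_iff_iff]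
  simp only [List.all_eq_true, decide_eq_true_eq]
  rw [List.isChain_iff_getElem]
  constructor
  · intro h i hi
    have h2 := h ((i : Nat) : Int) (by rw [PySem.List.mem_pyRange_one]; omega)
    rw [PySem.List.pyGetD_eq_getElem l 0 (by omega) (by omega),
      PySem.List.pyGetD_eq_getElem l 0 (by omega) (by omega)] at h2
    simp only [Int.toNat_natCast, show (((i : Nat) : Int) + 1).toNat = i + 1 by omega] at h2
    exact h2
  · intro h i hmem
    rw [PySem.List.mem_pyRange_one] at hmem
    rw [PySem.List.pyGetD_eq_getElem l 0 (by omega) (by omega),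
      PySem.List.pyGetD_eq_getElem l 0 (by omega) (by omega)]
    simp only [show (i + 1).toNat = i.toNat + 1 by omega]
    exact h i.toNat (by omega)

-- ===== VERDICT (by name: the statement is the Claim_ definition above) =====
theorem is_vector_csr_spec : Claim_equal_is_vector_csr := by
  intro vector _
  unfold Spec_is_vector_csr is_vector_csr is_vector_csr_alt
  by_cases hlen : vector.length < 2
  · simp [hlen, show ¬ (2 ≤ vector.length) by omega]
  · have h2 : 2 ≤ vector.length := by omega
    simp only [hlen, if_false]
    by_cases h0 : PySem.List.pyGetD vector 0 0 = 0
    · simp only [h0, ne_eq, not_true_eq_false, if_false]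
      rw [scanA_eq_chain]
      by_cases hch : List.IsChain (fun x1 x2 : Int => x1 ≤ x2) vector
      · have hs : PySem.List.sorted vector (fun x => x) false = vector :=
          (sorted_eq_self_iff_pairwise vector).mpr (List.isChain_iff_pairwise.mp hch)
        simp [hch, h2, hs]
      · have hs : PySem.List.sorted vector (fun x => x) false ≠ vector := by
          intro he
          exact hch (List.isChain_iff_pairwise.mpr
            ((sorted_eq_self_iff_pairwise vector).mp he))
        simp [hch, hs]
    · simp [h0, h2]
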